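-- pv_equiv track=rewrite | github.com/Garingor/BMSTU-2018-2022 | Python 1 2 semester/текст.py | normal_text
-- ===== SOURCE A (Python) =====
-- from copy import deepcopy
--
-- def normal_text(text):
--     text1 = deepcopy(text)
--     for i in range(len(text1)):
--         mas = ['#']
--         for k in range(len(text1[i])):
--             if text1[i][k] == ' ' and mas[len(mas) - 1] == ' ':
--                 continue
--             mas.append(text1[i][k])
--         k = ''
--         for j in range(1, len(mas)):
--             k += mas[j]
--         text1[i] = k
--     return text1
-- ===== SOURCE B (Python) =====
-- from itertools import groupby
--
-- def normal_text(text):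
--     return [''.join(' ' if ch == ' ' else ''.join(grp) for ch, grp in groupby(line))
--             for line in text]
-- ===== Notes on version B (the rewrite author's own statement) =====
-- stated objective: idiomatic
-- what changed: Replaces A's deepcopy + index loops with a previous-char sentinel list by a per-line itertools.groupby run-length pass that emits one space per space run and non-space runs verbatim.
import Mathlib
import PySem

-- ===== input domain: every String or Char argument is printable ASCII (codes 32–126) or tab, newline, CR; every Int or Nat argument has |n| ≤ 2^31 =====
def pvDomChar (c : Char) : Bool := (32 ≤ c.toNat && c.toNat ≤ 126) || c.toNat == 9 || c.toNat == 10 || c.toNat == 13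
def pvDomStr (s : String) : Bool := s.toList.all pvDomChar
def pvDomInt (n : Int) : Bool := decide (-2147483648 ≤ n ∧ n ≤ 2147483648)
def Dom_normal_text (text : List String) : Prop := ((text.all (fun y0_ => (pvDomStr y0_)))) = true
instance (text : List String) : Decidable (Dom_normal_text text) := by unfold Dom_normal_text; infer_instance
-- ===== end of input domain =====

-- B collapses space runs per line with a run-length grouping pass (itertools.groupby) instead of A's deepcopy + sentinel-list append loop; objective: idiomatic.


-- ===== PORT A =====
-- step of A's inner character loop: append unless current char and mas's last are both ' '
def pvStepA (mas : List Char) (c : Char) : List Char :=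
  if c = ' ' ∧ mas.getLastD '#' = ' ' then mas else mas ++ [c]

def normal_text (text : List String) : List String :=
  text.map (fun s =>
    let mas := s.toList.foldl pvStepA ['#']
    -- k = '' ; for j in range(1, len(mas)): k += mas[j]
    (mas.drop 1).foldl String.push "")

-- ===== PORT B =====
-- consecutive equal-character runs, as itertools.groupby yields them
def pvGroups : List Char → List (List Char)
  | [] => []
  | c :: cs => (c :: cs.takeWhile (· == c)) :: pvGroups (cs.dropWhile (· == c))
termination_by cs => cs.length
decreasing_by
  simpa using Nat.lt_succ_of_le (List.length_dropWhile_le _ _)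

-- ' ' if ch == ' ' else ''.join(grp), for one groupby group
def pvPiece (g : List Char) : List Char :=
  if g.head? = some ' ' then [' '] else g

def normal_text_alt (text : List String) : List String :=
  text.map (fun s => String.ofList (((pvGroups s.toList).map pvPiece).flatten))

-- ===== PRECONDITION & SPEC =====
def Spec_normal_text (text : List String) (out : List String) : Prop := out = normal_text_alt text
instance (text : List String) (out : List String) : Decidable (Spec_normal_text text out) := by unfold Spec_normal_text; infer_instance

-- ===== CLAIM (what is proved, stated in full; the proofs are below) =====
def Claim_equal_normal_text : Prop := ∀ (text : List String), Dom_normal_text text → Spec_normal_text text (normal_text text)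

-- ===== LEMMAS AND PROOFS =====

-- reference shape of the collapsed line: keep c unless both c and the previous kept char are ' '
def pvAux (prev : Char) : List Char → List Char
  | [] => []
  | c :: cs => if c = ' ' ∧ prev = ' ' then pvAux prev cs else c :: pvAux c cs

theorem pvAux_congr (p q : Char) (cs : List Char) (h : (p = ' ') ↔ (q = ' ')) :
    pvAux p cs = pvAux q cs := by
  induction cs with
  | nil => rfl
  | cons c cs ih =>
    simp only [pvAux]
    by_cases hc : c = ' '
    · by_cases hp : p = ' '
      · simp [hc, hp, h.mp hp]
      · have hq : ¬ q = ' ' := fun hq => hp (h.mpr hq)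
        simp [hc, hp, hq]
    · simp [hc]

theorem pvAux_spaces (run rest : List Char) (h : ∀ x ∈ run, x = ' ') :
    pvAux ' ' (run ++ rest) = pvAux ' ' rest := by
  induction run with
  | nil => rfl
  | cons x t ih =>
    have hx : x = ' ' := h x (by simp)
    simp only [List.cons_append, pvAux, hx, and_self, if_true]
    exact ih (fun y hy => h y (by simp [hy]))

theorem pvAux_keep (c : Char) (rest : List Char) (hc : c ≠ ' ') :
    ∀ run : List Char, (∀ x ∈ run, x = c) →
    pvAux c (run ++ rest) = run ++ pvAux c rest := by
  intro run
  induction run with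
  | nil => simp
  | cons x t ih =>
    intro h
    have hx : x = c := h x (by simp)
    subst hx
    simp only [List.cons_append, pvAux, hc, false_and, if_false]
    simp [ih (fun y hy => h y (by simp [hy]))]

theorem pvFoldA (cs : List Char) : ∀ (mas : List Char), mas ≠ [] →
    cs.foldl pvStepA mas = mas ++ pvAux (mas.getLastD '#') cs := by
  induction cs with
  | nil => simp [pvAux]
  | cons c cs ih =>
    intro mas hm
    simp only [List.foldl_cons, pvStepA, pvAux]
    by_cases hcond : c = ' ' ∧ mas.getLastD '#' = ' '
    · rw [if_pos hcond, if_pos hcond]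
      exact ih mas hm
    · rw [if_neg hcond, if_neg hcond]
      have hlast : (mas ++ [c]).getLastD '#' = c := by
        simp [List.getLastD_eq_getLast?, List.getLast?_append]
      rw [ih (mas ++ [c]) (by simp), hlast, List.append_assoc]
      rfl

theorem pvGroupsFlatten (cs : List Char) :
    ((pvGroups cs).map pvPiece).flatten = pvAux '#' cs := by
  induction cs using pvGroups.induct with
  | case1 => simp [pvGroups, pvAux]
  | case2 c cs ih =>
    have hsplit : cs.takeWhile (· == c) ++ cs.dropWhile (· == c) = cs :=
      List.takeWhile_append_dropWhile
    have htake : ∀ x ∈ cs.takeWhile (· == c), x = c := by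
      intro x hx
      simpa using List.mem_takeWhile_imp hx
    rw [pvGroups]
    simp only [List.map_cons, List.flatten_cons, ih]
    by_cases hc : c = ' '
    · subst hc
      rw [show pvPiece (' ' :: cs.takeWhile (· == ' ')) = [' '] from by simp [pvPiece]]
      have h1 : pvAux '#' (' ' :: cs) = ' ' :: pvAux ' ' cs := by
        simp [pvAux]
      have h2 : pvAux ' ' cs = pvAux ' ' (cs.dropWhile (· == ' ')) := by
        conv_lhs => rw [← hsplit]
        exact pvAux_spaces _ _ htake
      have h3 : pvAux ' ' (cs.dropWhile (· == ' ')) = pvAux '#' (cs.dropWhile (· == ' ')) := by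
        cases hrest : cs.dropWhile (· == ' ') with
        | nil => rfl
        | cons h t =>
          have hne : cs.dropWhile (· == ' ') ≠ [] := by simp [hrest]
          have hh := List.head_dropWhile_not (· == ' ') hne
          rw [show (cs.dropWhile (· == ' ')).head hne = h from by simp [hrest]] at hh
          have hh' : h ≠ ' ' := by simpa using hh
          simp [pvAux, hh']
      rw [h1, h2, h3]
      rfl
    · rw [show pvPiece (c :: cs.takeWhile (· == c)) = c :: cs.takeWhile (· == c) from by
        simp [pvPiece, hc]]
      have h1 : pvAux '#' (c :: cs) = c :: pvAux c cs := by
        simp [pvAux, hc]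
      have h2 : pvAux c cs = cs.takeWhile (· == c) ++ pvAux c (cs.dropWhile (· == c)) := by
        conv_lhs => rw [← hsplit]
        exact pvAux_keep c _ hc _ htake
      have h3 : pvAux c (cs.dropWhile (· == c)) = pvAux '#' (cs.dropWhile (· == c)) :=
        pvAux_congr c '#' _ (iff_of_false hc (by decide))
      rw [h1, h2, h3]
      simp

theorem pvPushFold : ∀ (l : List Char) (s : List Char),
    l.foldl String.push (String.ofList s) = String.ofList (s ++ l) := by
  intro l
  induction l with
  | nil => simp
  | cons c t ih =>
    intro s
    have hp : (String.ofList s).push c = String.ofList (s ++ [c]) := by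
      apply String.toList_inj.mp
      simp
    simp only [List.foldl_cons, hp, ih]
    simp

theorem pvLine (s : String) :
    ((s.toList.foldl pvStepA ['#']).drop 1).foldl String.push "" =
      String.ofList (((pvGroups s.toList).map pvPiece).flatten) := by
  rw [pvFoldA s.toList ['#'] (by simp)]
  rw [show (['#'] ++ pvAux (['#'].getLastD '#') s.toList).drop 1 = pvAux '#' s.toList from by simp]
  rw [pvGroupsFlatten]
  have h := pvPushFold (pvAux '#' s.toList) []
  simpa using h

-- ===== VERDICT (by name: the statement is the Claim_ definition above) =====
theorem normal_text_spec : Claim_equal_normal_text := by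
  intro text _
  unfold Spec_normal_text normal_text normal_text_alt
  exact List.map_congr_left (fun s _ => pvLine s)
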